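-- pv_equiv track=rewrite | github.com/vzpd/myBrushRecord | exercise/练习_快速公交.py | busRapidTransit
-- ===== SOURCE A (Python) =====
-- import heapq
-- from typing import List
--
-- def busRapidTransit(target: int, inc: int, dec: int, jump: List[int], cost: List[int]) -> int:
--     q = [[0, target]]
--     vis = set()
--     while q:
--
--         spend, cur = heapq.heappop(q)
--         if cur in vis:
--             continue
--         if cur == 0:
--             return spend % (10 ** 9 + 7)
--         vis.add(cur)
--         heapq.heappush(q, [spend + cur * inc, 0])
--         for j, c in zip(jump, cost):
--             m, y = divmod(cur, j)
--             if m not in vis: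
--                 heapq.heappush(q, [spend + c + y * inc, m])
--             if m + 1 not in vis:
--                 heapq.heappush(q, [spend + c + dec * (j - y), m + 1])
-- ===== SOURCE B (Python) =====
-- def busRapidTransit(target, inc, dec, jump, cost):
--     MOD = 10 ** 9 + 7
--     edges = list(zip(jump, cost))
--     dist = {target: 0}      # tentative cost of each discovered, unsettled state
--     settled = set()
--     while True:
--         x, d = min(dist.items(), key=lambda kv: (kv[1], kv[0]))
--         if x == 0:
--             return d % MOD
--         del dist[x]
--         settled.add(x)
--         nd = d + x * inc
--         if 0 not in dist or nd < dist[0]: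
--             dist[0] = nd
--         for j, c in edges:
--             m, y = divmod(x, j)
--             if m not in settled:
--                 v = d + c + y * inc
--                 if m not in dist or v < dist[m]:
--                     dist[m] = v
--             if m + 1 not in settled:
--                 v = d + c + dec * (j - y)
--                 if m + 1 not in dist or v < dist[m + 1]:
--                     dist[m + 1] = v
-- ===== Notes on version B (the rewrite author's own statement) =====
-- stated objective: faster
-- what changed: The lazy-deletion binary heap full of redundant pushes (plus a visited set to skip stale entries) is replaced by label-setting over a dictionary that keeps exactly one tentative cost per discovered state, settling the (cost, state)-minimal entry by a direct scan, so duplicate queue entries and the skip loop disappear.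
-- outside the precondition, e.g. on busRapidTransit(3, -1, 1, [1], [1]): A returns 1000000004, B returns 1000000004; on busRapidTransit(4, 1, 1, [0], [1]): A raises ZeroDivisionError, B raises ZeroDivisionError
import Mathlib
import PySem

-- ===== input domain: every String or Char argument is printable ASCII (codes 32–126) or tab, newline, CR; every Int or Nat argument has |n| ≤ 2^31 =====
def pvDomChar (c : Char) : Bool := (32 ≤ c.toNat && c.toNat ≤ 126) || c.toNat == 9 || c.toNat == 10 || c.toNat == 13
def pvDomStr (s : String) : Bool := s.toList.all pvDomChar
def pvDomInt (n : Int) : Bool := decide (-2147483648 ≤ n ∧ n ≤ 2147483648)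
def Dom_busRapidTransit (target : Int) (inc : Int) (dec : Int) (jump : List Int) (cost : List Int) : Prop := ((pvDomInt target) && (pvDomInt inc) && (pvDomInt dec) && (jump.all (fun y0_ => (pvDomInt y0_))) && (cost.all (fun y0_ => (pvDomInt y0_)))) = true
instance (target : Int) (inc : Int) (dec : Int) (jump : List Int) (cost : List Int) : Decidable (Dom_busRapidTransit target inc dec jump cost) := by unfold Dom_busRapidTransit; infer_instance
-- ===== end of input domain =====

-- B replaces A's lazy-deletion binary heap (redundant pushes, skipped later via a
-- visited set) by a dictionary with one tentative cost per discovered state,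
-- settled by a direct minimum scan; the return values agree on Pre_.

-- ===== PORT A =====

-- '[spend, cur] < [spend2, cur2]': Python's comparison of two-element int lists
def pvPairLt (a b : Int × Int) : Bool :=
  decide (a.1 < b.1) || (a.1 == b.1 && decide (a.2 < b.2))

-- heapq exactness note: the heap holds two-element int lists, whose comparison is a
-- strict total order on distinct values, and heappop returns the minimum element of
-- the multiset held by the heap; so modelling the heap as an unordered list with
-- min-extraction (pvMinPair, then List.erase of that minimum) is value-exact.
def pvMinPair (q : List (Int × Int)) : Option (Int × Int) :=
  match q with
  | [] => none
  | p :: ps => some (ps.foldl (fun m r => if pvPairLt r m then r else m) p)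

-- body of A's 'for j, c in zip(jump, cost)' push loop (vis' already contains cur)
def pvPushStep (inc dec s c : Int) (vis' : List Int) (acc : List (Int × Int))
    (jc : Int × Int) : List (Int × Int) :=
  let m := PySem.Int.floordiv c jc.1
  let y := PySem.Int.mod c jc.1
  let acc1 := if m ∈ vis' then acc else (s + jc.2 + y * inc, m) :: acc
  if m + 1 ∈ vis' then acc1 else (s + jc.2 + dec * (jc.1 - y), m + 1) :: acc1

-- A's 'while q' loop; the fuel only makes the recursion total (sufficient on Pre_)
def pvLoopA (inc dec : Int) (edges : List (Int × Int)) :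
    Nat → List (Int × Int) → List Int → Int
  | 0, _, _ => 0
  | fuel + 1, q, vis =>
    match pvMinPair q with
    | none => 0  -- 'while q' exhausted: Python A returns None; unreachable under Pre_
    | some sc =>
      if sc.2 ∈ vis then
        pvLoopA inc dec edges fuel (q.erase sc) vis
      else if sc.2 = 0 then
        PySem.Int.mod sc.1 1000000007
      else
        pvLoopA inc dec edges fuel
          (edges.foldl (pvPushStep inc dec sc.1 sc.2 (PySem.Set.add vis sc.2))
            ((sc.1 + sc.2 * inc, 0) :: q.erase sc))
          (PySem.Set.add vis sc.2)

def pvFuelA (target inc : Int) (n : Nat) : Nat :=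
  (2 * n + 2) * (2 * (target.natAbs + target.natAbs * inc.natAbs) + 12) + 2

def busRapidTransit (target : Int) (inc : Int) (dec : Int) (jump : List Int) (cost : List Int) : Int :=
  pvLoopA inc dec (jump.zip cost) (pvFuelA target inc (jump.zip cost).length) [(0, target)] []

-- ===== PORT B =====

-- min(dist.items(), key=lambda kv: (kv[1], kv[0])); the minimum is unique because
-- the keys are distinct, so Python's first-minimum rule needs no modelling
def pvScanMin (items : List (Int × Int)) : Option (Int × Int) :=
  match items with
  | [] => none  -- min() of an empty dict raises ValueError; unreachable under Pre_
  | kv :: rest => some (rest.foldl (fun b r => if pvPairLt (r.2, r.1) (b.2, b.1) then r else b) kv)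

-- 'if k not in dist or v < dist[k]: dist[k] = v'
def pvRelax (d : PySem.Dict Int Int) (k v : Int) : PySem.Dict Int Int :=
  match d.get? k with
  | none => d.insert k v
  | some w => if v < w then d.insert k v else d

-- body of B's 'for j, c in edges' relax loop (settled' already contains x)
def pvRelaxStep (inc dec x d : Int) (settled' : List Int) (dd : PySem.Dict Int Int)
    (jc : Int × Int) : PySem.Dict Int Int :=
  let m := PySem.Int.floordiv x jc.1
  let y := PySem.Int.mod x jc.1
  let dd1 := if m ∈ settled' then dd else pvRelax dd m (d + jc.2 + y * inc)
  if m + 1 ∈ settled' then dd1 else pvRelax dd1 (m + 1) (d + jc.2 + dec * (jc.1 - y))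

-- B's 'while True' loop; the fuel only makes the recursion total (sufficient on Pre_)
def pvLoopB (inc dec : Int) (edges : List (Int × Int)) :
    Nat → PySem.Dict Int Int → List Int → Int
  | 0, _, _ => 0
  | fuel + 1, dist, settled =>
    match pvScanMin dist.items with
    | none => 0  -- min() on an empty dict would raise; unreachable under Pre_
    | some xd =>
      if xd.1 = 0 then
        PySem.Int.mod xd.2 1000000007
      else
        pvLoopB inc dec edges fuel
          (edges.foldl (pvRelaxStep inc dec xd.1 xd.2 (PySem.Set.add settled xd.1))
            (pvRelax ((dist.erase xd.1)) 0 (xd.2 + xd.1 * inc)))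
          (PySem.Set.add settled xd.1)

def pvFuelB (target inc : Int) : Nat :=
  2 * (target.natAbs + target.natAbs * inc.natAbs) + 13

def busRapidTransit_alt (target : Int) (inc : Int) (dec : Int) (jump : List Int) (cost : List Int) : Int :=
  pvLoopB inc dec (jump.zip cost) (pvFuelB target inc) (PySem.Dict.mk [(target, 0)]) []

-- ===== PRECONDITION & SPEC =====

-- Pre_ excludes inputs on which A's heap loop never terminates or raises
-- ZeroDivisionError (a used jump of 0), keeping every input whose used jumps all
-- have |jump| ≥ 2 (with arbitrary other parameters) and the problem's whole natural
-- domain (target, inc, dec, cost nonnegative, jumps ≥ 1, step cost ≥ 1 on unit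
-- jumps); the remaining irregular combinations — a unit jump with nonpositive step
-- cost c+dec, where A provably loops forever, or unit jumps mixed with negative
-- costs/increments, where the reachable state space has no closed-form bound — are
-- excluded because A can diverge there.
def Pre_busRapidTransit (target : Int) (inc : Int) (dec : Int) (jump : List Int) (cost : List Int) : Prop :=
  (∀ p ∈ jump.zip cost, p.1 ≤ -2 ∨ 2 ≤ p.1) ∨
  (0 ≤ target ∧ 0 ≤ inc ∧ 0 ≤ dec ∧
    ∀ p ∈ jump.zip cost, 1 ≤ p.1 ∧ 0 ≤ p.2 ∧ (p.1 = 1 → 1 ≤ p.2 + dec))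
instance (target : Int) (inc : Int) (dec : Int) (jump : List Int) (cost : List Int) : Decidable (Pre_busRapidTransit target inc dec jump cost) := by unfold Pre_busRapidTransit; infer_instance

def pvWitness_busRapidTransit : Int × Int × Int × List Int × List Int :=
  (10, 1, 2, [1, 3], [3, 1])

def Spec_busRapidTransit (target : Int) (inc : Int) (dec : Int) (jump : List Int) (cost : List Int) (out : Int) : Prop := out = busRapidTransit_alt target inc dec jump cost
instance (target : Int) (inc : Int) (dec : Int) (jump : List Int) (cost : List Int) (out : Int) : Decidable (Spec_busRapidTransit target inc dec jump cost out) := by unfold Spec_busRapidTransit; infer_instance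

-- ===== CLAIM (what is proved, stated in full; the proofs are below) =====
def Claim_equal_busRapidTransit : Prop := ∀ (target : Int) (inc : Int) (dec : Int) (jump : List Int) (cost : List Int), Dom_busRapidTransit target inc dec jump cost → Pre_busRapidTransit target inc dec jump cost → Spec_busRapidTransit target inc dec jump cost (busRapidTransit target inc dec jump cost)

-- ===== LEMMAS AND PROOFS =====

-- ---- proof-side notions ----

-- spends of the heap entries for state x (as a multiset; order never matters)
def pvSpends (q : List (Int × Int)) (x : Int) : List Int :=
  (q.filter (fun p => p.2 == x)).map Prod.fst

-- 'o is the minimum of l' (none ↔ l empty)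
def pvOptMin (o : Option Int) (l : List Int) : Prop :=
  match o with
  | none => l = []
  | some v => v ∈ l ∧ ∀ w ∈ l, v ≤ w

-- the simulation relation: for every unsettled state, B's tentative cost is the
-- minimum spend among A's pending heap entries for that state
def pvRel (dist : PySem.Dict Int Int) (q : List (Int × Int)) (vis : List Int) : Prop :=
  ∀ x : Int, x ∉ vis → pvOptMin (dist.get? x) (pvSpends q x)

-- loop invariant of A's heap for the all-|j|≥2 case: states stay in [-Mb, Mb]
def pvInvA (Mb : Int) (q : List (Int × Int)) (vis : List Int) : Prop :=
  (∀ p ∈ q, -Mb ≤ p.2 ∧ p.2 ≤ Mb) ∧ (∀ v ∈ vis, -Mb ≤ v ∧ v ≤ Mb) ∧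
  vis.Nodup ∧ (0 : Int) ∉ vis ∧ ∃ p ∈ q, p.2 ∉ vis

-- loop invariant of A's heap for the nonnegative (unit-jump-allowing) case:
-- spends are nonnegative, each state is ≤ target + its spend, and a 0-entry of
-- spend ≤ target*inc is present (initially the untouched start configuration)
def pvInvP (T inc : Int) (q : List (Int × Int)) (vis : List Int) : Prop :=
  (∀ p ∈ q, 0 ≤ p.1 ∧ 0 ≤ p.2 ∧ p.2 ≤ T + p.1) ∧
  (∀ v ∈ vis, 0 ≤ v ∧ v ≤ T + T * inc) ∧
  vis.Nodup ∧ (0 : Int) ∉ vis ∧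
  ((∃ p ∈ q, p.2 = 0 ∧ p.1 ≤ T * inc) ∨ (q = [(0, T)] ∧ vis = []))

def pvInvB (dist : PySem.Dict Int Int) (vis : List Int) : Prop :=
  dist.keys.Nodup ∧ ∀ k ∈ dist.keys, k ∉ vis

def pvEOK (edges : List (Int × Int)) : Prop := ∀ e ∈ edges, e.1 ≤ -2 ∨ 2 ≤ e.1

-- ---- order facts ----

lemma pvPairLt_irrefl (a : Int × Int) : pvPairLt a a = false := by
  simp [pvPairLt]

lemma pvPairLt_trans {a b c : Int × Int} (h1 : pvPairLt a b = true)
    (h2 : pvPairLt b c = true) : pvPairLt a c = true := by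
  simp only [pvPairLt, Bool.or_eq_true, Bool.and_eq_true, decide_eq_true_eq,
    beq_iff_eq] at *
  omega

lemma pvPairLt_ge_trans {a b c : Int × Int} (h1 : pvPairLt a b = false)
    (h2 : pvPairLt b c = false) : pvPairLt a c = false := by
  simp only [pvPairLt, Bool.or_eq_false_iff, Bool.and_eq_false_iff,
    decide_eq_false_iff_not, beq_eq_false_iff_ne, ne_eq, not_lt] at *
  omega

lemma pvPairLt_antisymm {a b : Int × Int} (h1 : pvPairLt a b = false)
    (h2 : pvPairLt b a = false) : a = b := by
  simp only [pvPairLt, Bool.or_eq_false_iff, Bool.and_eq_false_iff,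
    decide_eq_false_iff_not, beq_eq_false_iff_ne, ne_eq, not_lt] at *
  have : a.1 = b.1 ∧ a.2 = b.2 := by omega
  exact Prod.ext this.1 this.2

-- the foldl in pvMinPair / pvScanMin picks an element no other element is below
lemma pvFoldlMin_spec {α : Type} (lt : α → α → Bool)
    (hirr : ∀ a, lt a a = false)
    (htr : ∀ a b c, lt a b = true → lt b c = true → lt a c = true)
    (hge : ∀ a b c, lt a b = false → lt b c = false → lt a c = false) :
    ∀ (ps : List α) (p : α),
      (ps.foldl (fun m r => if lt r m then r else m) p) ∈ p :: ps ∧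
      ∀ x ∈ p :: ps, lt x (ps.foldl (fun m r => if lt r m then r else m) p) = false := by
  intro ps
  induction ps with
  | nil =>
    intro p
    refine ⟨List.mem_cons_self .., ?_⟩
    intro x hx
    rw [List.mem_singleton] at hx
    subst hx
    exact hirr x
  | cons r ps ih =>
    intro p
    simp only [List.foldl_cons]
    by_cases hrp : lt r p = true
    · rw [if_pos hrp]
      obtain ⟨hmem, hmin⟩ := ih r
      refine ⟨List.mem_cons_of_mem _ hmem, ?_⟩
      intro x hx
      rcases List.mem_cons.1 hx with rfl | hx
      · cases hpl : lt x (ps.foldl (fun m r => if lt r m then r else m) r) with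
        | false => rfl
        | true =>
          exact absurd (htr _ _ _ hrp hpl) (by simp [hmin r (List.mem_cons_self ..)])
      · exact hmin x hx
    · have hrp' : lt r p = false := by revert hrp; cases lt r p <;> simp
      rw [if_neg (by simp [hrp'])]
      obtain ⟨hmem, hmin⟩ := ih p
      constructor
      · rcases List.mem_cons.1 hmem with h | h
        · rw [h]; exact List.mem_cons_self ..
        · exact List.mem_cons_of_mem _ (List.mem_cons_of_mem _ h)
      · intro x hx
        rcases List.mem_cons.1 hx with rfl | hx
        · exact hmin x (List.mem_cons_self ..)
        · rcases List.mem_cons.1 hx with rfl | hx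
          · exact hge _ _ _ hrp' (hmin p (List.mem_cons_self ..))
          · exact hmin x (List.mem_cons_of_mem _ hx)

lemma pvMinPair_spec {q : List (Int × Int)} {p : Int × Int}
    (h : pvMinPair q = some p) : p ∈ q ∧ ∀ r ∈ q, pvPairLt r p = false := by
  match q, h with
  | a :: ps, h =>
    have h' : ps.foldl (fun m r => if pvPairLt r m then r else m) a = p := by
      simpa [pvMinPair] using h
    obtain ⟨hmem, hmin⟩ := pvFoldlMin_spec pvPairLt pvPairLt_irrefl
      (fun _ _ _ => pvPairLt_trans) (fun _ _ _ => pvPairLt_ge_trans) ps a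
    rw [h'] at hmem hmin
    exact ⟨hmem, hmin⟩

lemma pvMinPair_eq_none {q : List (Int × Int)} : pvMinPair q = none ↔ q = [] := by
  cases q <;> simp [pvMinPair]

lemma pvScanMin_spec {l : List (Int × Int)} {kv : Int × Int}
    (h : pvScanMin l = some kv) :
    kv ∈ l ∧ ∀ r ∈ l, pvPairLt (r.2, r.1) (kv.2, kv.1) = false := by
  match l, h with
  | a :: rest, h =>
    have h' : rest.foldl (fun b r => if pvPairLt (r.2, r.1) (b.2, b.1) then r else b) a = kv := by
      simpa [pvScanMin] using h
    obtain ⟨hmem, hmin⟩ := pvFoldlMin_spec (fun a b => pvPairLt (a.2, a.1) (b.2, b.1))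
      (fun a => pvPairLt_irrefl _)
      (by intro a b c h1 h2; simp only at h1 h2 ⊢; exact pvPairLt_trans h1 h2)
      (by intro a b c h1 h2; simp only at h1 h2 ⊢; exact pvPairLt_ge_trans h1 h2) rest a
    rw [h'] at hmem hmin
    exact ⟨hmem, hmin⟩

lemma pvScanMin_eq_none {l : List (Int × Int)} : pvScanMin l = none ↔ l = [] := by
  cases l <;> simp [pvScanMin]

-- ---- pvSpends facts ----

lemma pvSpends_cons (v m : Int) (q : List (Int × Int)) (x : Int) :
    pvSpends ((v, m) :: q) x = if m = x then v :: pvSpends q x else pvSpends q x := by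
  by_cases h : m = x <;> simp [pvSpends, h]

lemma pvMem_spends {q : List (Int × Int)} {x w : Int} :
    w ∈ pvSpends q x ↔ (w, x) ∈ q := by
  simp only [pvSpends, List.mem_map, List.mem_filter, beq_iff_eq]
  constructor
  · rintro ⟨⟨a, b⟩, ⟨hm, he⟩, hw⟩
    simp only at he hw
    subst he; subst hw
    exact hm
  · intro h; exact ⟨(w, x), ⟨h, rfl⟩, rfl⟩

lemma pvSpends_erase_of_ne {q : List (Int × Int)} {sc : Int × Int} {x : Int}
    (hm : sc ∈ q) (hx : x ≠ sc.2) : pvSpends (q.erase sc) x = pvSpends q x := by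
  obtain ⟨l1, l2, _, hq, he⟩ := List.exists_erase_eq hm
  have hbeq : (sc.2 == x) = false := by
    simp only [beq_eq_false_iff_ne, ne_eq]
    exact fun h => hx h.symm
  rw [he, hq]
  simp [pvSpends, List.filter_append, hbeq]

-- ---- dict erase / relax facts ----

lemma pvGet?_erase_of_ne (d : PySem.Dict Int Int) {k c : Int} (h : k ≠ c) :
    (d.erase c).get? k = d.get? k := by
  simp only [PySem.Dict.erase, PySem.Dict.get?]
  congr 1
  induction d.items with
  | nil => rfl
  | cons a l ih =>
    by_cases hac : a.1 = c
    · have h1 : (a.1 == k) = false := by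
        simp only [beq_eq_false_iff_ne, ne_eq, hac]
        exact fun hh => h hh.symm
      have h2 : (c == k) = false := by
        simp only [beq_eq_false_iff_ne, ne_eq]
        exact fun hh => h hh.symm
      simp [hac, h2, ih]
    · by_cases hak : a.1 = k
      · simp [List.filter_cons, hac, List.find?_cons, hak, h]
      · simp [List.filter_cons, hac, List.find?_cons, hak, h, ih]

lemma pvKeys_erase_nodup (d : PySem.Dict Int Int) (c : Int)
    (h : d.keys.Nodup) : (d.erase c).keys.Nodup := by
  simp only [PySem.Dict.erase, PySem.Dict.keys] at *
  exact h.sublist (List.filter_sublist.map Prod.fst)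

lemma pvMem_keys_erase {d : PySem.Dict Int Int} {k c : Int}
    (h : k ∈ (d.erase c).keys) : k ∈ d.keys ∧ k ≠ c := by
  simp only [PySem.Dict.erase, PySem.Dict.keys, List.mem_map, List.mem_filter] at *
  obtain ⟨p, ⟨hp, hpc⟩, rfl⟩ := h
  refine ⟨⟨p, hp, rfl⟩, ?_⟩
  simpa using hpc

lemma pvRelax_eq_insert_of_none {d : PySem.Dict Int Int} {k : Int} (v : Int)
    (h : d.get? k = none) : pvRelax d k v = d.insert k v := by
  unfold pvRelax; rw [h]

lemma pvRelax_eq_insert_of_lt {d : PySem.Dict Int Int} {k v w : Int}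
    (h : d.get? k = some w) (hv : v < w) : pvRelax d k v = d.insert k v := by
  unfold pvRelax; rw [h]; simp [hv]

lemma pvRelax_eq_self_of_ge {d : PySem.Dict Int Int} {k v w : Int}
    (h : d.get? k = some w) (hv : ¬ v < w) : pvRelax d k v = d := by
  unfold pvRelax; rw [h]; simp [hv]

lemma pvRelax_keys_nodup (d : PySem.Dict Int Int) (k v : Int)
    (h : d.keys.Nodup) : (pvRelax d k v).keys.Nodup := by
  cases hg : d.get? k with
  | none => rw [pvRelax_eq_insert_of_none v hg]; exact PySem.Dict.nodup_keys_insert d k v h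
  | some w =>
    by_cases hv : v < w
    · rw [pvRelax_eq_insert_of_lt hg hv]; exact PySem.Dict.nodup_keys_insert d k v h
    · rw [pvRelax_eq_self_of_ge hg hv]; exact h

lemma pvMem_keys_relax {d : PySem.Dict Int Int} {k v x : Int}
    (h : x ∈ (pvRelax d k v).keys) : x = k ∨ x ∈ d.keys := by
  cases hg : d.get? k with
  | none =>
    rw [pvRelax_eq_insert_of_none v hg] at h
    exact (PySem.Dict.mem_keys_insert _ _ _ _).1 h
  | some w =>
    by_cases hv : v < w
    · rw [pvRelax_eq_insert_of_lt hg hv] at h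
      exact (PySem.Dict.mem_keys_insert _ _ _ _).1 h
    · rw [pvRelax_eq_self_of_ge hg hv] at h
      exact Or.inr h

lemma pvGet?_relax_of_ne (d : PySem.Dict Int Int) {k v x : Int} (h : x ≠ k) :
    (pvRelax d k v).get? x = d.get? x := by
  cases hg : d.get? k with
  | none => rw [pvRelax_eq_insert_of_none v hg]; exact PySem.Dict.get?_insert_of_ne d v h
  | some w =>
    by_cases hv : v < w
    · rw [pvRelax_eq_insert_of_lt hg hv]; exact PySem.Dict.get?_insert_of_ne d v h
    · rw [pvRelax_eq_self_of_ge hg hv]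

lemma pvOptMin_relax (d : PySem.Dict Int Int) (k v : Int) (l : List Int)
    (h : pvOptMin (d.get? k) l) : pvOptMin ((pvRelax d k v).get? k) (v :: l) := by
  cases hg : d.get? k with
  | none =>
    rw [hg] at h
    simp only [pvOptMin] at h
    subst h
    rw [pvRelax_eq_insert_of_none v hg, PySem.Dict.get?_insert_self]
    exact ⟨List.mem_cons_self .., by intro u hu; simp at hu; omega⟩
  | some w =>
    rw [hg] at h
    obtain ⟨hw, hwmin⟩ := h
    by_cases hv : v < w
    · rw [pvRelax_eq_insert_of_lt hg hv, PySem.Dict.get?_insert_self]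
      refine ⟨List.mem_cons_self .., ?_⟩
      intro u hu
      rcases List.mem_cons.1 hu with rfl | hu
      · exact le_refl _
      · exact le_of_lt (lt_of_lt_of_le hv (hwmin u hu))
    · rw [pvRelax_eq_self_of_ge hg hv, hg]
      refine ⟨List.mem_cons_of_mem _ hw, ?_⟩
      intro u hu
      rcases List.mem_cons.1 hu with rfl | hu
      · omega
      · exact hwmin u hu

-- one unguarded push/relax pair preserves the simulation relation
lemma pvStepPair (vis' : List Int) (k v : Int) (acc : List (Int × Int))
    (dd : PySem.Dict Int Int) (hnd : dd.keys.Nodup)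
    (hkv : ∀ x ∈ dd.keys, x ∉ vis')
    (hrel : ∀ x, x ∉ vis' → pvOptMin (dd.get? x) (pvSpends acc x))
    (hk : k ∉ vis') :
    (pvRelax dd k v).keys.Nodup ∧ (∀ x ∈ (pvRelax dd k v).keys, x ∉ vis') ∧
    (∀ x, x ∉ vis' → pvOptMin ((pvRelax dd k v).get? x) (pvSpends ((v, k) :: acc) x)) := by
  refine ⟨pvRelax_keys_nodup dd k v hnd, ?_, ?_⟩
  · intro x hx
    rcases pvMem_keys_relax hx with rfl | hx
    · exact hk
    · exact hkv x hx
  · intro x hx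
    rw [pvSpends_cons]
    by_cases hxk : k = x
    · subst hxk
      rw [if_pos rfl]
      exact pvOptMin_relax dd k v _ (hrel k hx)
    · rw [if_neg hxk, pvGet?_relax_of_ne dd (fun h => hxk h.symm)]
      exact hrel x hx

-- ---- generic facts about the push fold ----

-- membership / length facts about one guarded push step
lemma pvPushStep_mem {inc dec s c : Int} {vis' : List Int} {acc : List (Int × Int)}
    {e p : Int × Int} (hp : p ∈ pvPushStep inc dec s c vis' acc e) :
    p = (s + e.2 + PySem.Int.mod c e.1 * inc, PySem.Int.floordiv c e.1) ∨
    p = (s + e.2 + dec * (e.1 - PySem.Int.mod c e.1), PySem.Int.floordiv c e.1 + 1) ∨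
    p ∈ acc := by
  by_cases hm1 : PySem.Int.floordiv c e.1 ∈ vis' <;>
    by_cases hm2 : PySem.Int.floordiv c e.1 + 1 ∈ vis' <;>
      simp [pvPushStep, hm1, hm2] at hp <;> tauto

lemma pvPushStep_mem_of {inc dec s c : Int} {vis' : List Int} {acc : List (Int × Int)}
    {e p : Int × Int} (hp : p ∈ acc) : p ∈ pvPushStep inc dec s c vis' acc e := by
  by_cases hm1 : PySem.Int.floordiv c e.1 ∈ vis' <;>
    by_cases hm2 : PySem.Int.floordiv c e.1 + 1 ∈ vis' <;>
      simp [pvPushStep, hm1, hm2] <;> tauto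

lemma pvPushStep_len (inc dec s c : Int) (vis' : List Int) (acc : List (Int × Int))
    (e : Int × Int) : (pvPushStep inc dec s c vis' acc e).length ≤ acc.length + 2 := by
  by_cases hm1 : PySem.Int.floordiv c e.1 ∈ vis' <;>
    by_cases hm2 : PySem.Int.floordiv c e.1 + 1 ∈ vis' <;>
      simp [pvPushStep, hm1, hm2]

-- every entry of the fold result is an old entry or one of the two per-edge pushes
lemma pvPushFold_forall (inc dec s c : Int) (vis' : List Int) (P : Int × Int → Prop) :
    ∀ (edges acc : List (Int × Int)),
      (∀ p ∈ acc, P p) →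
      (∀ e ∈ edges, P (s + e.2 + PySem.Int.mod c e.1 * inc, PySem.Int.floordiv c e.1) ∧
        P (s + e.2 + dec * (e.1 - PySem.Int.mod c e.1), PySem.Int.floordiv c e.1 + 1)) →
      ∀ p ∈ edges.foldl (pvPushStep inc dec s c vis') acc, P p := by
  intro edges
  induction edges with
  | nil => intro acc hacc _ p hp; exact hacc p hp
  | cons e es ih =>
    intro acc hacc hE p hp
    rw [List.foldl_cons] at hp
    refine ih _ ?_ (fun r hr => hE r (List.mem_cons_of_mem _ hr)) p hp
    intro r hr
    obtain ⟨h1, h2⟩ := hE e (List.mem_cons_self ..)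
    rcases pvPushStep_mem hr with rfl | rfl | hr
    · exact h1
    · exact h2
    · exact hacc r hr

lemma pvPushFold_subset (inc dec s c : Int) (vis' : List Int) :
    ∀ (edges acc : List (Int × Int)) (p : Int × Int), p ∈ acc →
      p ∈ edges.foldl (pvPushStep inc dec s c vis') acc := by
  intro edges
  induction edges with
  | nil => intro acc p hp; exact hp
  | cons e es ih =>
    intro acc p hp
    rw [List.foldl_cons]
    exact ih _ p (pvPushStep_mem_of hp)

lemma pvPushFold_len (inc dec s c : Int) (vis' : List Int) :
    ∀ (edges acc : List (Int × Int)),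
      (edges.foldl (pvPushStep inc dec s c vis') acc).length ≤
        acc.length + 2 * edges.length := by
  intro edges
  induction edges with
  | nil => intro acc; simp
  | cons e es ih =>
    intro acc
    rw [List.foldl_cons]
    have h1 := pvPushStep_len inc dec s c vis' acc e
    have := ih (pvPushStep inc dec s c vis' acc e)
    simp only [List.length_cons]
    omega

-- the push fold and the relax fold stay in simulation (dict keys distinct,
-- unsettled, and each tentative cost the minimum pending spend)
lemma pvFoldRel (inc dec s c : Int) (vis' : List Int) :
    ∀ (edges : List (Int × Int)) (acc : List (Int × Int)) (dd : PySem.Dict Int Int),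
      dd.keys.Nodup →
      (∀ k ∈ dd.keys, k ∉ vis') →
      (∀ x, x ∉ vis' → pvOptMin (dd.get? x) (pvSpends acc x)) →
      (edges.foldl (pvRelaxStep inc dec c s vis') dd).keys.Nodup ∧
      (∀ k ∈ (edges.foldl (pvRelaxStep inc dec c s vis') dd).keys, k ∉ vis') ∧
      (∀ x, x ∉ vis' → pvOptMin ((edges.foldl (pvRelaxStep inc dec c s vis') dd).get? x)
          (pvSpends (edges.foldl (pvPushStep inc dec s c vis') acc) x)) := by
  intro edges
  induction edges with
  | nil =>
    intro acc dd hnd hkv hrel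
    exact ⟨hnd, hkv, hrel⟩
  | cons e es ih =>
    intro acc dd hnd hkv hrel
    simp only [List.foldl_cons]
    by_cases hm1 : PySem.Int.floordiv c e.1 ∈ vis'
    · by_cases hm2 : PySem.Int.floordiv c e.1 + 1 ∈ vis'
      · have hA : pvPushStep inc dec s c vis' acc e = acc := by
          simp [pvPushStep, hm1, hm2]
        have hB : pvRelaxStep inc dec c s vis' dd e = dd := by
          simp [pvRelaxStep, hm1, hm2]
        rw [hA, hB]
        exact ih acc dd hnd hkv hrel
      · obtain ⟨s1, s2, s3⟩ := pvStepPair vis' (PySem.Int.floordiv c e.1 + 1)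
          (s + e.2 + dec * (e.1 - PySem.Int.mod c e.1)) acc dd hnd hkv hrel hm2
        have hA : pvPushStep inc dec s c vis' acc e
            = (s + e.2 + dec * (e.1 - PySem.Int.mod c e.1), PySem.Int.floordiv c e.1 + 1) :: acc := by
          simp [pvPushStep, hm1, hm2]
        have hB : pvRelaxStep inc dec c s vis' dd e
            = pvRelax dd (PySem.Int.floordiv c e.1 + 1) (s + e.2 + dec * (e.1 - PySem.Int.mod c e.1)) := by
          simp [pvRelaxStep, hm1, hm2]
        rw [hA, hB]
        exact ih _ _ s1 s2 s3
    · by_cases hm2 : PySem.Int.floordiv c e.1 + 1 ∈ vis'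
      · obtain ⟨s1, s2, s3⟩ := pvStepPair vis' (PySem.Int.floordiv c e.1)
          (s + e.2 + PySem.Int.mod c e.1 * inc) acc dd hnd hkv hrel hm1
        have hA : pvPushStep inc dec s c vis' acc e
            = (s + e.2 + PySem.Int.mod c e.1 * inc, PySem.Int.floordiv c e.1) :: acc := by
          simp [pvPushStep, hm1, hm2]
        have hB : pvRelaxStep inc dec c s vis' dd e
            = pvRelax dd (PySem.Int.floordiv c e.1) (s + e.2 + PySem.Int.mod c e.1 * inc) := by
          simp [pvRelaxStep, hm1, hm2]
        rw [hA, hB]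
        exact ih _ _ s1 s2 s3
      · obtain ⟨s1, s2, s3⟩ := pvStepPair vis' (PySem.Int.floordiv c e.1)
          (s + e.2 + PySem.Int.mod c e.1 * inc) acc dd hnd hkv hrel hm1
        obtain ⟨t1, t2, t3⟩ := pvStepPair vis' (PySem.Int.floordiv c e.1 + 1)
          (s + e.2 + dec * (e.1 - PySem.Int.mod c e.1))
          ((s + e.2 + PySem.Int.mod c e.1 * inc, PySem.Int.floordiv c e.1) :: acc)
          (pvRelax dd (PySem.Int.floordiv c e.1) (s + e.2 + PySem.Int.mod c e.1 * inc))
          s1 s2 s3 hm2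
        have hA : pvPushStep inc dec s c vis' acc e
            = (s + e.2 + dec * (e.1 - PySem.Int.mod c e.1), PySem.Int.floordiv c e.1 + 1)
              :: (s + e.2 + PySem.Int.mod c e.1 * inc, PySem.Int.floordiv c e.1) :: acc := by
          simp [pvPushStep, hm1, hm2]
        have hB : pvRelaxStep inc dec c s vis' dd e
            = pvRelax (pvRelax dd (PySem.Int.floordiv c e.1) (s + e.2 + PySem.Int.mod c e.1 * inc))
                (PySem.Int.floordiv c e.1 + 1) (s + e.2 + dec * (e.1 - PySem.Int.mod c e.1)) := by
          simp [pvRelaxStep, hm1, hm2]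
        rw [hA, hB]
        exact ih _ _ t1 t2 t3

-- ---- arithmetic bounds for new states ----

lemma pvDivBound {Mb x j : Int} (hMb : 4 ≤ Mb) (hx1 : -Mb ≤ x) (hx2 : x ≤ Mb)
    (hj : j ≤ -2 ∨ 2 ≤ j) :
    -Mb ≤ PySem.Int.floordiv x j ∧ PySem.Int.floordiv x j + 1 ≤ Mb := by
  rcases hj with hj | hj
  · have heq : PySem.Int.floordiv x j * j + PySem.Int.mod x j = x :=
      PySem.Int.floordiv_mul_add_mod x j
    have hr : j < PySem.Int.mod x j ∧ PySem.Int.mod x j ≤ 0 :=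
      PySem.Int.mod_neg_bounds (a := x) (b := j) (by omega)
    set m := PySem.Int.floordiv x j
    set r := PySem.Int.mod x j
    constructor
    · by_cases h0 : 0 ≤ m
      · omega
      · have h2 : 2 * (-m - 1) ≤ (-j) * (-m - 1) :=
          mul_le_mul_of_nonneg_right (by omega) (by omega)
        have h3 : (-j) * (-m - 1) = m * j + j := by ring
        omega
    · by_cases h0 : m ≤ 0
      · omega
      · have h2 : m * j ≤ m * (-2) := mul_le_mul_of_nonneg_left (by omega) (by omega)
        have h3 : m * (-2) = -(2 * m) := by ring
        omega
  · have hbr : PySem.Int.floordiv x j * j ≤ x ∧ x < (PySem.Int.floordiv x j + 1) * j :=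
      (PySem.Int.floordiv_eq_iff_of_pos (by omega : (0 : Int) < j)).1 rfl
    obtain ⟨hlo, hhi⟩ := hbr
    set m := PySem.Int.floordiv x j
    constructor
    · by_cases h0 : 0 ≤ m
      · omega
      · have h2 : (m + 1) * j ≤ (m + 1) * 2 := by nlinarith
        have h3 : (m + 1) * 2 = 2 * m + 2 := by ring
        omega
    · by_cases h0 : m ≤ 0
      · omega
      · have h2 : m * 2 ≤ m * j := by nlinarith
        have h3 : m * 2 = 2 * m := by ring
        omega

-- Python divmod facts for a positive state and a positive divisor
lemma pvPosDiv {c j : Int} (hc : 1 ≤ c) (hj : 1 ≤ j) :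
    0 ≤ PySem.Int.floordiv c j ∧ PySem.Int.floordiv c j ≤ c ∧
    0 ≤ PySem.Int.mod c j ∧ PySem.Int.mod c j < j ∧
    (j = 1 → PySem.Int.floordiv c j = c ∧ PySem.Int.mod c j = 0) ∧
    (2 ≤ j → PySem.Int.floordiv c j + 1 ≤ c) := by
  have heq : PySem.Int.floordiv c j * j + PySem.Int.mod c j = c :=
    PySem.Int.floordiv_mul_add_mod c j
  have hy0 : 0 ≤ PySem.Int.mod c j := PySem.Int.mod_nonneg (a := c) (by omega)
  have hyj : PySem.Int.mod c j < j := PySem.Int.mod_lt (a := c) (by omega)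
  set m := PySem.Int.floordiv c j
  set y := PySem.Int.mod c j
  have hm0 : 0 ≤ m := by
    by_contra h
    have h2 : m * j ≤ (-1) * j := mul_le_mul_of_nonneg_right (by omega) (by omega)
    have h3 : (-1 : Int) * j = -j := by ring
    omega
  have hmc : m ≤ c := by
    have h2 : m * 1 ≤ m * j := mul_le_mul_of_nonneg_left hj hm0
    have h3 : m * 1 = m := by ring
    omega
  refine ⟨hm0, hmc, hy0, hyj, ?_, ?_⟩
  · rintro rfl
    have h3 : m * 1 = m := by ring
    omega
  · intro h2j
    by_cases hm1 : m ≤ 0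
    · omega
    · have h2 : m * 2 ≤ m * j := mul_le_mul_of_nonneg_left (by omega) (by omega)
      have h3 : m * 2 = 2 * m := by ring
      have h4 : m * j ≤ c := by omega
      omega

lemma pvVisLen {Mb : Int} (vis : List Int) (hn : vis.Nodup)
    (hb : ∀ v ∈ vis, -Mb ≤ v ∧ v ≤ Mb) (hMb : 0 ≤ Mb) :
    (vis.length : Int) ≤ 2 * Mb + 1 := by
  have h1 : vis.toFinset ⊆ Finset.Icc (-Mb) Mb := by
    intro v hv
    rw [List.mem_toFinset] at hv
    exact Finset.mem_Icc.2 (hb v hv)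
  have h2 := Finset.card_le_card h1
  rw [List.toFinset_card_of_nodup hn] at h2
  have h3 : (Finset.Icc (-Mb) Mb).card = (Mb + 1 - (-Mb)).toNat := Int.card_Icc (-Mb) Mb
  omega

-- ---- B's scan selects exactly the entry A pops (when it is not stale) ----

lemma pvSelect {dist : PySem.Dict Int Int} {q : List (Int × Int)} {vis : List Int}
    {sc : Int × Int} (hIB : pvInvB dist vis) (hR : pvRel dist q vis)
    (hscq : sc ∈ q) (hscmin : ∀ r ∈ q, pvPairLt r sc = false) (hgar : sc.2 ∉ vis) :
    pvScanMin dist.items = some (sc.2, sc.1) := by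
  obtain ⟨hnd, hkv⟩ := hIB
  obtain ⟨s, c⟩ := sc
  simp only at hgar hscmin ⊢
  have h1 : s ∈ pvSpends q c := pvMem_spends.2 hscq
  have h2 := hR c hgar
  cases hg : dist.get? c with
  | none =>
    rw [hg] at h2
    simp only [pvOptMin] at h2
    rw [h2] at h1
    simp at h1
  | some v =>
    rw [hg] at h2
    obtain ⟨hvmem, hvmin⟩ := h2
    have hvq : (v, c) ∈ q := pvMem_spends.1 hvmem
    have hge1 := hscmin _ hvq
    have hvs : v = s := by
      have hle := hvmin s h1
      simp only [pvPairLt, Bool.or_eq_false_iff, Bool.and_eq_false_iff,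
        decide_eq_false_iff_not, beq_eq_false_iff_ne, ne_eq, not_lt] at hge1
      omega
    subst hvs
    have hitems : (c, v) ∈ dist.items := PySem.Dict.mem_items_of_get?_eq_some _ hg
    cases hscan : pvScanMin dist.items with
    | none =>
      rw [pvScanMin_eq_none] at hscan
      rw [hscan] at hitems
      simp at hitems
    | some kv =>
      obtain ⟨hkvmem, hkvmin⟩ := pvScanMin_spec hscan
      obtain ⟨k2, v2⟩ := kv
      have hk1 : k2 ∈ dist.keys := by
        simp only [PySem.Dict.keys, List.mem_map]
        exact ⟨(k2, v2), hkvmem, rfl⟩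
      have hknv := hkv _ hk1
      have hgkv : dist.get? k2 = some v2 := PySem.Dict.get?_of_mem_items _ hkvmem hnd
      have h3 := hR k2 hknv
      rw [hgkv] at h3
      have hq2 : (v2, k2) ∈ q := pvMem_spends.1 h3.1
      have hA := hscmin _ hq2
      have hB := hkvmin (c, v) hitems
      simp only at hB
      have heq : ((v, c) : Int × Int) = (v2, k2) := pvPairLt_antisymm hB hA
      have hvv : v2 = v ∧ k2 = c := by
        constructor
        · exact (congrArg Prod.fst heq).symm
        · exact (congrArg Prod.snd heq).symm
      obtain ⟨rfl, rfl⟩ := hvv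
      rfl

-- ---- the main simulation, generic in the heap invariant ----

lemma pvSimG (inc dec : Int) (edges : List (Int × Int)) (Mb : Int) (Nsz : Nat)
    (Inv : List (Int × Int) → List Int → Prop)
    (hMb0 : 0 ≤ Mb) (hNsz : 2 * Mb + 1 ≤ (Nsz : Int))
    (hproj : ∀ q vis, Inv q vis →
      (∀ v ∈ vis, -Mb ≤ v ∧ v ≤ Mb) ∧ vis.Nodup ∧ (0 : Int) ∉ vis ∧ ∃ p ∈ q, p.2 ∉ vis)
    (hstale : ∀ q vis sc, Inv q vis → sc ∈ q → sc.2 ∈ vis → Inv (q.erase sc) vis)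
    (hpop : ∀ q vis sc, Inv q vis → sc ∈ q → (∀ r ∈ q, pvPairLt r sc = false) →
      sc.2 ∉ vis → sc.2 ≠ 0 →
      (-Mb ≤ sc.2 ∧ sc.2 ≤ Mb) ∧
      Inv (edges.foldl (pvPushStep inc dec sc.1 sc.2 (vis ++ [sc.2]))
            ((sc.1 + sc.2 * inc, 0) :: q.erase sc)) (vis ++ [sc.2])) :
    ∀ (fa fb : Nat) (q : List (Int × Int)) (vis : List Int) (dist : PySem.Dict Int Int),
      Inv q vis → pvInvB dist vis → pvRel dist q vis →
      (2 * edges.length + 2) * (Nsz - vis.length) + q.length + 1 ≤ fa →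
      (Nsz - vis.length) + 2 ≤ fb →
      pvLoopA inc dec edges fa q vis = pvLoopB inc dec edges fb dist vis := by
  intro fa
  induction fa with
  | zero =>
    intro fb q vis dist _ _ _ hfa _
    omega
  | succ fa ih =>
    intro fb q vis dist hIA hIB hR hfa hfb
    obtain ⟨hvb, hvnd, h0v, pw, hpwq, hpwv⟩ := hproj q vis hIA
    have hq_ne : q ≠ [] := by rintro rfl; simp at hpwq
    cases hmin : pvMinPair q with
    | none => exact absurd (pvMinPair_eq_none.1 hmin) hq_ne
    | some sc =>
      obtain ⟨hscq, hscmin⟩ := pvMinPair_spec hmin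
      simp only [pvLoopA, hmin]
      by_cases hgar : sc.2 ∈ vis
      · rw [if_pos hgar]
        have hlen : (q.erase sc).length = q.length - 1 := List.length_erase_of_mem hscq
        have hqpos : 0 < q.length := List.length_pos_of_mem hscq
        apply ih fb (q.erase sc) vis dist
        · exact hstale q vis sc hIA hscq hgar
        · exact hIB
        · intro x hx
          rw [pvSpends_erase_of_ne hscq (fun h => hx (by rw [h]; exact hgar))]
          exact hR x hx
        · omega
        · exact hfb
      · rw [if_neg hgar]
        have hscan := pvSelect hIB hR hscq hscmin hgar
        cases fb with
        | zero => omega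
        | succ fb =>
          simp only [pvLoopB, hscan]
          by_cases h0 : sc.2 = 0
          · simp only [if_pos h0]
          · simp only [if_neg h0]
            obtain ⟨hscb, hInv'⟩ := hpop q vis sc hIA hscq hscmin hgar h0
            set vis' := PySem.Set.add vis sc.2 with hvis'def
            have hvis'eq : vis' = vis ++ [sc.2] := PySem.Set.add_of_not_mem hgar
            have hbase_rel : ∀ x, x ∉ vis' →
                pvOptMin ((dist.erase sc.2).get? x) (pvSpends (q.erase sc) x) := by
              intro x hx
              have hxv : x ∉ vis ∧ x ≠ sc.2 := by
                rw [hvis'eq] at hx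
                simp at hx
                tauto
              rw [pvGet?_erase_of_ne dist hxv.2, pvSpends_erase_of_ne hscq hxv.2]
              exact hR x hxv.1
            have hbase_nd : (dist.erase sc.2).keys.Nodup := pvKeys_erase_nodup dist sc.2 hIB.1
            have hbase_kv : ∀ k ∈ (dist.erase sc.2).keys, k ∉ vis' := by
              intro k hk
              obtain ⟨hk1, hk2⟩ := pvMem_keys_erase hk
              rw [hvis'eq]
              simp
              exact ⟨hIB.2 k hk1, hk2⟩
            have h0vis' : (0 : Int) ∉ vis' := by
              rw [hvis'eq]
              simp
              exact ⟨h0v, fun h => h0 h.symm⟩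
            obtain ⟨hs_nd, hs_kv, hs_rel⟩ := pvStepPair vis' 0 (sc.1 + sc.2 * inc)
              (q.erase sc) (dist.erase sc.2) hbase_nd hbase_kv hbase_rel h0vis'
            obtain ⟨hf_nd, hf_kv, hf_rel⟩ :=
              pvFoldRel inc dec sc.1 sc.2 vis' edges
                ((sc.1 + sc.2 * inc, 0) :: q.erase sc)
                (pvRelax (dist.erase sc.2) 0 (sc.1 + sc.2 * inc))
                hs_nd hs_kv hs_rel
            rw [← hvis'eq] at hInv'
            obtain ⟨hvb', hvnd', _, _⟩ := hproj _ _ hInv'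
            have hlenvis' : vis'.length = vis.length + 1 := by rw [hvis'eq]; simp
            have hvis'N : (vis'.length : Int) ≤ 2 * Mb + 1 := pvVisLen vis' hvnd' hvb' hMb0
            have hvisleN : vis'.length ≤ Nsz := by
              have hc : (vis'.length : Int) ≤ (Nsz : Int) := le_trans hvis'N hNsz
              exact_mod_cast hc
            have hqlen : (q.erase sc).length = q.length - 1 := List.length_erase_of_mem hscq
            have hqpos : 0 < q.length := List.length_pos_of_mem hscq
            have hf_len := pvPushFold_len inc dec sc.1 sc.2 vis' edges
              ((sc.1 + sc.2 * inc, 0) :: q.erase sc)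
            simp only [List.length_cons] at hf_len
            apply ih fb _ vis' _
            · exact hInv'
            · exact ⟨hf_nd, hf_kv⟩
            · exact hf_rel
            · have hsub : Nsz - vis.length = (Nsz - vis'.length) + 1 := by omega
              have hKexp : (2 * edges.length + 2) * ((Nsz - vis'.length) + 1)
                  = (2 * edges.length + 2) * (Nsz - vis'.length) + (2 * edges.length + 2) := by
                ring
              rw [hsub, hKexp] at hfa
              omega
            · omega

-- ---- case 1: every used jump has |j| ≥ 2 ----

lemma pvInvA_proj (Mb : Int) (q : List (Int × Int)) (vis : List Int)
    (h : pvInvA Mb q vis) :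
    (∀ v ∈ vis, -Mb ≤ v ∧ v ≤ Mb) ∧ vis.Nodup ∧ (0 : Int) ∉ vis ∧ ∃ p ∈ q, p.2 ∉ vis := by
  obtain ⟨_, h2, h3, h4, h5⟩ := h
  exact ⟨h2, h3, h4, h5⟩

lemma pvInvA_stale (Mb : Int) (q : List (Int × Int)) (vis : List Int) (sc : Int × Int)
    (h : pvInvA Mb q vis) (_hscq : sc ∈ q) (hgar : sc.2 ∈ vis) :
    pvInvA Mb (q.erase sc) vis := by
  obtain ⟨hqb, hvb, hvnd, h0v, pw, hpwq, hpwv⟩ := h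
  refine ⟨fun p hp => hqb p (List.mem_of_mem_erase hp), hvb, hvnd, h0v, pw, ?_, hpwv⟩
  have hne : pw ≠ sc := by
    intro h
    rw [h] at hpwv
    exact hpwv hgar
  exact (List.mem_erase_of_ne hne).2 hpwq

lemma pvInvA_pop (inc dec Mb : Int) (edges : List (Int × Int))
    (hMb : 4 ≤ Mb) (hE : pvEOK edges)
    (q : List (Int × Int)) (vis : List Int) (sc : Int × Int)
    (h : pvInvA Mb q vis) (hscq : sc ∈ q) (hgar : sc.2 ∉ vis) (h0 : sc.2 ≠ 0) :
    (-Mb ≤ sc.2 ∧ sc.2 ≤ Mb) ∧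
    pvInvA Mb (edges.foldl (pvPushStep inc dec sc.1 sc.2 (vis ++ [sc.2]))
      ((sc.1 + sc.2 * inc, 0) :: q.erase sc)) (vis ++ [sc.2]) := by
  obtain ⟨hqb, hvb, hvnd, h0v, _, _, _⟩ := h
  obtain ⟨hsc_lo, hsc_hi⟩ := hqb sc hscq
  refine ⟨⟨hsc_lo, hsc_hi⟩, ?_, ?_, ?_, ?_, ?_⟩
  · apply pvPushFold_forall inc dec sc.1 sc.2 (vis ++ [sc.2])
      (fun p => -Mb ≤ p.2 ∧ p.2 ≤ Mb) edges
    · intro p hp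
      rcases List.mem_cons.1 hp with rfl | hp
      · constructor <;> simp <;> omega
      · exact hqb p (List.mem_of_mem_erase hp)
    · intro e he
      obtain ⟨hd1, hd2⟩ := pvDivBound hMb hsc_lo hsc_hi (hE e he)
      exact ⟨⟨hd1, by omega⟩, ⟨by omega, hd2⟩⟩
  · intro v hv
    rcases List.mem_append.1 hv with hv | hv
    · exact hvb v hv
    · rw [List.mem_singleton] at hv
      subst hv
      exact ⟨hsc_lo, hsc_hi⟩
  · apply List.Nodup.append hvnd (List.nodup_singleton _)
    intro a ha hb
    rw [List.mem_singleton] at hb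
    exact hgar (hb ▸ ha)
  · simp
    exact ⟨h0v, fun h => h0 h.symm⟩
  · refine ⟨(sc.1 + sc.2 * inc, 0),
      pvPushFold_subset inc dec sc.1 sc.2 (vis ++ [sc.2]) edges _ _ (List.mem_cons_self ..), ?_⟩
    simp
    exact ⟨h0v, fun h => h0 h.symm⟩

-- ---- case 2: the nonnegative domain (unit jumps allowed) ----

def pvEOKP (dec : Int) (edges : List (Int × Int)) : Prop :=
  ∀ e ∈ edges, 1 ≤ e.1 ∧ 0 ≤ e.2 ∧ (e.1 = 1 → 1 ≤ e.2 + dec)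

lemma pvInvP_proj (T inc : Int) (hT : 0 ≤ T) (hinc : 0 ≤ inc)
    (q : List (Int × Int)) (vis : List Int) (h : pvInvP T inc q vis) :
    (∀ v ∈ vis, -(T + T * inc + 1) ≤ v ∧ v ≤ T + T * inc + 1) ∧
    vis.Nodup ∧ (0 : Int) ∉ vis ∧ ∃ p ∈ q, p.2 ∉ vis := by
  obtain ⟨_, h2, h3, h4, h5⟩ := h
  have hTi : 0 ≤ T * inc := mul_nonneg hT hinc
  refine ⟨fun v hv => ⟨by have := (h2 v hv).1; omega, by have := (h2 v hv).2; omega⟩,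
    h3, h4, ?_⟩
  rcases h5 with ⟨p, hpq, hp0, _⟩ | ⟨hq, hv⟩
  · exact ⟨p, hpq, by rw [hp0]; exact h4⟩
  · exact ⟨(0, T), by rw [hq]; exact List.mem_cons_self .., by rw [hv]; simp⟩

lemma pvInvP_stale (T inc : Int) (q : List (Int × Int)) (vis : List Int) (sc : Int × Int)
    (h : pvInvP T inc q vis) (_hscq : sc ∈ q) (hgar : sc.2 ∈ vis) :
    pvInvP T inc (q.erase sc) vis := by
  obtain ⟨hqb, hvb, hvnd, h0v, hw⟩ := h
  refine ⟨fun p hp => hqb p (List.mem_of_mem_erase hp), hvb, hvnd, h0v, ?_⟩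
  rcases hw with ⟨p, hpq, hp0, hple⟩ | ⟨hq, hv⟩
  · have hne : p ≠ sc := by
      intro he
      rw [he] at hp0
      rw [hp0] at hgar
      exact h0v hgar
    exact Or.inl ⟨p, (List.mem_erase_of_ne hne).2 hpq, hp0, hple⟩
  · exfalso
    rw [hv] at hgar
    simp at hgar

lemma pvInvP_pop (T inc dec : Int) (edges : List (Int × Int))
    (hT : 0 ≤ T) (hinc : 0 ≤ inc) (hdec : 0 ≤ dec) (hE : pvEOKP dec edges)
    (q : List (Int × Int)) (vis : List Int) (sc : Int × Int)
    (h : pvInvP T inc q vis) (hscq : sc ∈ q)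
    (hscmin : ∀ r ∈ q, pvPairLt r sc = false) (hgar : sc.2 ∉ vis) (h0 : sc.2 ≠ 0) :
    (-(T + T * inc + 1) ≤ sc.2 ∧ sc.2 ≤ T + T * inc + 1) ∧
    pvInvP T inc (edges.foldl (pvPushStep inc dec sc.1 sc.2 (vis ++ [sc.2]))
      ((sc.1 + sc.2 * inc, 0) :: q.erase sc)) (vis ++ [sc.2]) := by
  obtain ⟨hqb, hvb, hvnd, h0v, hw⟩ := h
  obtain ⟨hs0, hc0, hcb⟩ := hqb sc hscq
  have hTi : 0 ≤ T * inc := mul_nonneg hT hinc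
  have hc1 : 1 ≤ sc.2 := by omega
  -- the popped spend is at most T*inc (a cheaper-or-equal 0-entry is pending)
  have hsle : sc.1 ≤ T * inc := by
    rcases hw with ⟨p, hpq, hp0, hple⟩ | ⟨hq, _⟩
    · have hm := hscmin p hpq
      simp only [pvPairLt, Bool.or_eq_false_iff, Bool.and_eq_false_iff,
        decide_eq_false_iff_not, beq_eq_false_iff_ne, ne_eq, not_lt] at hm
      omega
    · rw [hq] at hscq
      rw [List.mem_singleton] at hscq
      rw [hscq]
      exact hTi
  have hscT : sc.2 ≤ T + T * inc := by omega
  refine ⟨⟨by omega, by omega⟩, ?_, ?_, ?_, ?_, ?_⟩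
  · -- entrywise invariant of the expanded heap
    apply pvPushFold_forall inc dec sc.1 sc.2 (vis ++ [sc.2])
      (fun p => 0 ≤ p.1 ∧ 0 ≤ p.2 ∧ p.2 ≤ T + p.1) edges
    · intro p hp
      rcases List.mem_cons.1 hp with rfl | hp
      · have : 0 ≤ sc.2 * inc := mul_nonneg hc0 hinc
        constructor
        · simp; omega
        · constructor
          · simp
          · simp; omega
      · exact hqb p (List.mem_of_mem_erase hp)
    · intro e he
      obtain ⟨hj1, hec, hj1c⟩ := hE e he
      obtain ⟨hm0, hmc, hy0, hyj, hje1, hjge2⟩ := pvPosDiv hc1 hj1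
      set m := PySem.Int.floordiv sc.2 e.1
      set y := PySem.Int.mod sc.2 e.1
      have hyi : 0 ≤ y * inc := mul_nonneg hy0 hinc
      have hdjy : 0 ≤ dec * (e.1 - y) := mul_nonneg hdec (by omega)
      constructor
      · exact ⟨by omega, hm0, by omega⟩
      · refine ⟨by omega, by omega, ?_⟩
        by_cases hj : e.1 = 1
        · obtain ⟨hmeq, hyeq⟩ := hje1 hj
          have hce : e.1 - y = 1 := by omega
          rw [hce] at *
          have : dec * (1 : Int) = dec := by ring
          have h1c := hj1c hj
          omega
        · have := hjge2 (by omega)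
          omega
  · intro v hv
    rcases List.mem_append.1 hv with hv | hv
    · exact hvb v hv
    · rw [List.mem_singleton] at hv
      subst hv
      exact ⟨by omega, hscT⟩
  · apply List.Nodup.append hvnd (List.nodup_singleton _)
    intro a ha hb
    rw [List.mem_singleton] at hb
    exact hgar (hb ▸ ha)
  · simp
    exact ⟨h0v, fun h => h0 h.symm⟩
  · -- a 0-entry of spend ≤ T*inc is still pending
    left
    rcases hw with ⟨p, hpq, hp0, hple⟩ | ⟨hq, _⟩
    · have hne : p ≠ sc := by
        intro he
        rw [he] at hp0
        exact h0 hp0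
      refine ⟨p, pvPushFold_subset inc dec sc.1 sc.2 (vis ++ [sc.2]) edges _ _
        (List.mem_cons_of_mem _ ((List.mem_erase_of_ne hne).2 hpq)), hp0, hple⟩
    · rw [hq] at hscq
      rw [List.mem_singleton] at hscq
      refine ⟨(sc.1 + sc.2 * inc, 0), pvPushFold_subset inc dec sc.1 sc.2 (vis ++ [sc.2])
        edges _ _ (List.mem_cons_self ..), rfl, ?_⟩
      have h1 : sc.1 = 0 := by rw [hscq]
      have h2 : sc.2 = T := by rw [hscq]
      rw [h1, h2]
      simp

-- ---- the common initial configuration ----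

lemma pvInitB (target : Int) :
    pvInvB (PySem.Dict.mk [(target, 0)]) [] ∧
    pvRel (PySem.Dict.mk [(target, 0)]) [(0, target)] [] := by
  constructor
  · constructor
    · simp [PySem.Dict.keys]
    · simp [PySem.Dict.keys]
  · intro x _
    by_cases hxt : target = x
    · subst hxt
      have hg : (PySem.Dict.mk [(target, (0 : Int))]).get? target = some 0 := by
        rw [PySem.Dict.get?_mk_cons]
        simp
      rw [hg]
      have hs : pvSpends [((0 : Int), target)] target = [0] := by
        simp [pvSpends]
      rw [hs]
      refine ⟨List.mem_singleton_self _, ?_⟩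
      intro w hw
      rw [List.mem_singleton] at hw
      omega
    · have hb : (target == x) = false := by simp [hxt]
      have hg : (PySem.Dict.mk [(target, (0 : Int))]).get? x = none := by
        rw [PySem.Dict.get?_mk_cons, hb]
        rfl
      rw [hg]
      have hs : pvSpends [((0 : Int), target)] x = [] := by
        simp [pvSpends, hb]
      rw [hs]
      rfl

-- ===== VERDICT (by name: the statement is the Claim_ definition above) =====
theorem busRapidTransit_spec : Claim_equal_busRapidTransit := by
  unfold Claim_equal_busRapidTransit
  intro target inc dec jump cost _hDom hPre
  unfold Spec_busRapidTransit busRapidTransit busRapidTransit_alt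
  obtain ⟨hB1, hB2⟩ := pvInitB target
  rcases hPre with hP1 | ⟨hT, hinc, hdec, hP2⟩
  · -- every used jump has |j| ≥ 2: states stay within |target| + 4
    apply pvSimG inc dec (jump.zip cost) ((target.natAbs : Int) + 4) (2 * target.natAbs + 9)
      (pvInvA ((target.natAbs : Int) + 4))
      (by omega) (by push_cast; omega)
      (fun q vis h => pvInvA_proj _ q vis h)
      (fun q vis sc h h1 h2 => pvInvA_stale _ q vis sc h h1 h2)
      (fun q vis sc h h1 h2 h3 h4 =>
        pvInvA_pop inc dec _ (jump.zip cost) (by omega) hP1 q vis sc h h1 h3 h4)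
    · refine ⟨?_, by simp, by simp, by simp, (0, target), by simp, by simp⟩
      intro p hp
      rw [List.mem_singleton] at hp
      subst hp
      show -((target.natAbs : Int) + 4) ≤ target ∧ target ≤ (target.natAbs : Int) + 4
      omega
    · exact hB1
    · exact hB2
    · simp only [List.length_nil, List.length_cons, Nat.sub_zero, pvFuelA]
      have hmul : (2 * (jump.zip cost).length + 2) * (2 * target.natAbs + 9)
          ≤ (2 * (jump.zip cost).length + 2)
            * (2 * (target.natAbs + target.natAbs * inc.natAbs) + 12) :=
        Nat.mul_le_mul_left _ (by omega)
      omega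
    · simp [pvFuelB]
      omega
  · -- the nonnegative domain: spends are bounded by target*inc, states by
    -- target + target*inc
    have hTn : (target.natAbs : Int) = target := Int.natAbs_of_nonneg hT
    have hin : (inc.natAbs : Int) = inc := Int.natAbs_of_nonneg hinc
    have hK : ((target.natAbs + target.natAbs * inc.natAbs : Nat) : Int)
        = target + target * inc := by
      push_cast
      rw [abs_of_nonneg hT, abs_of_nonneg hinc]
    have hTi : 0 ≤ target * inc := mul_nonneg hT hinc
    apply pvSimG inc dec (jump.zip cost) (target + target * inc + 1)
      (2 * (target.natAbs + target.natAbs * inc.natAbs) + 3)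
      (pvInvP target inc)
      (by omega) (by push_cast at hK ⊢; omega)
      (fun q vis h => pvInvP_proj target inc hT hinc q vis h)
      (fun q vis sc h h1 h2 => pvInvP_stale target inc q vis sc h h1 h2)
      (fun q vis sc h h1 h2 h3 h4 =>
        pvInvP_pop target inc dec (jump.zip cost) hT hinc hdec hP2
          q vis sc h h1 h2 h3 h4)
    · refine ⟨?_, by simp, by simp, by simp, Or.inr ⟨rfl, rfl⟩⟩
      intro p hp
      rw [List.mem_singleton] at hp
      subst hp
      exact ⟨le_refl _, hT, by simp⟩
    · exact hB1
    · exact hB2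
    · simp only [List.length_nil, List.length_cons, Nat.sub_zero, pvFuelA]
      have hmul : (2 * (jump.zip cost).length + 2)
            * (2 * (target.natAbs + target.natAbs * inc.natAbs) + 3)
          ≤ (2 * (jump.zip cost).length + 2)
            * (2 * (target.natAbs + target.natAbs * inc.natAbs) + 12) :=
        Nat.mul_le_mul_left _ (by omega)
      omega
    · simp [pvFuelB]
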